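-- pv_equiv track=rewrite | github.com/jesusleandroleonbotello/python-jesus | CampusLands-practicas/Problemas de guias anteriores/Guia 7 - Funciones/Ejercicios 2/funcionesPractica.py | filtrarTexto
-- ===== SOURCE A (Python) =====
-- def filtrarTexto(text):
--     textoArray = text.split(" ")
--     textoArrayFiltrada = []
--
--     for i in range(len(textoArray)):
--         if textoArray[i] != "":
--             textoArrayFiltrada.append(textoArray[i])
--
--     textoFinal = "".join(textoArrayFiltrada)
--     return textoFinal
-- ===== SOURCE B (Python) =====
-- def filtrarTexto(text):
--     return text.replace(" ", "")
-- ===== Notes on version B (the rewrite author's own statement) =====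
-- stated objective: simpler
-- what changed: Replaces the split-on-space / filter-empty-tokens / join pipeline and its intermediate list with a single character-level str.replace call that deletes every space in one pass.
import Mathlib
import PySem

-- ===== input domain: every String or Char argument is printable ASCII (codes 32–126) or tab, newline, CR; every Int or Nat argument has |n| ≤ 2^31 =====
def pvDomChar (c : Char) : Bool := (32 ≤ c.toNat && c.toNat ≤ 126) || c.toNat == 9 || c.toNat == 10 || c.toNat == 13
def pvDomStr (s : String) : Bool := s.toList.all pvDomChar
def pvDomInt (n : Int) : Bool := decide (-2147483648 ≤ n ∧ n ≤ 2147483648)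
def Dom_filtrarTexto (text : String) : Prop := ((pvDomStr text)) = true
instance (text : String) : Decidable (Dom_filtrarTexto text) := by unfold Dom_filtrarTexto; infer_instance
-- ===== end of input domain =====

-- B replaces A's split/filter/join token pipeline with one character-level space substitution (objective: simpler).

-- ===== PORT A =====
-- text.split(" "): sep " " is non-empty, so Python never raises; we port it with the sep ≠ "" form Chars.splitOn.
def filtrarTexto (text : String) : String :=
  let textoArray : List (List Char) := PySem.Chars.splitOn text.toList [' ']
  let textoArrayFiltrada : List (List Char) :=
    (PySem.List.pyRange 0 (PySem.List.len textoArray) 1).foldl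
      (fun acc i => if PySem.List.pyGetD textoArray i [] ≠ [] then
                      acc ++ [PySem.List.pyGetD textoArray i []] else acc) []
  let textoFinal := PySem.Chars.join [] textoArrayFiltrada
  String.ofList textoFinal

-- ===== PORT B =====
def filtrarTexto_alt (text : String) : String :=
  PySem.Str.replace text " " ""

-- ===== PRECONDITION & SPEC =====
def Spec_filtrarTexto (text : String) (out : String) : Prop := out = filtrarTexto_alt text
instance (text : String) (out : String) : Decidable (Spec_filtrarTexto text out) := by unfold Spec_filtrarTexto; infer_instance

-- ===== CLAIM (what is proved, stated in full; the proofs are below) =====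
def Claim_equal_filtrarTexto : Prop := ∀ (text : String), Dom_filtrarTexto text → Spec_filtrarTexto text (filtrarTexto text)

-- ===== LEMMAS AND PROOFS =====

-- replace.go with old = [' '], new = [] deletes spaces: it is filtering out ' '.
theorem replace_go_space (fuel : Nat) : ∀ (l acc : List Char), l.length ≤ fuel →
    PySem.Chars.replace.go [' '] [] fuel l acc = acc.reverse ++ l.filter (· ≠ ' ') := by
  induction fuel with
  | zero =>
    intro l acc h
    have : l = [] := List.eq_nil_of_length_eq_zero (Nat.le_zero.mp h)
    subst this
    simp [PySem.Chars.replace.go]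
  | succ n ih =>
    intro l acc h
    cases l with
    | nil => simp [PySem.Chars.replace.go]
    | cons c rest =>
      by_cases hc : c = ' '
      · subst hc
        rw [show PySem.Chars.replace.go [' '] [] (n+1) (' ' :: rest) acc
              = PySem.Chars.replace.go [' '] [] n rest acc by
            simp [PySem.Chars.replace.go, List.isPrefixOf]]
        rw [ih rest acc (by simpa using h)]
        simp
      · rw [show PySem.Chars.replace.go [' '] [] (n+1) (c :: rest) acc
              = PySem.Chars.replace.go [' '] [] n rest (c :: acc) by
            simp only [PySem.Chars.replace.go, List.isPrefixOf]
            simp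
            exact fun h => absurd h.symm hc]
        rw [ih rest (c :: acc) (by simpa using h)]
        simp [hc]

-- flattening the pieces of splitOn.go on [' '] recovers the input minus its spaces.
theorem splitOn_go_space (fuel : Nat) : ∀ (l cur : List Char) (acc : List (List Char)),
    l.length ≤ fuel →
    (PySem.Chars.splitOn.go [' '] fuel l cur acc).flatten
      = acc.reverse.flatten ++ cur.reverse ++ l.filter (· ≠ ' ') := by
  induction fuel with
  | zero =>
    intro l cur acc h
    have : l = [] := List.eq_nil_of_length_eq_zero (Nat.le_zero.mp h)
    subst this
    simp [PySem.Chars.splitOn.go]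
  | succ n ih =>
    intro l cur acc h
    cases l with
    | nil => simp [PySem.Chars.splitOn.go]
    | cons c rest =>
      by_cases hc : c = ' '
      · subst hc
        rw [show PySem.Chars.splitOn.go [' '] (n+1) (' ' :: rest) cur acc
              = PySem.Chars.splitOn.go [' '] n rest [] (cur.reverse :: acc) by
            simp [PySem.Chars.splitOn.go, List.isPrefixOf]]
        rw [ih rest [] (cur.reverse :: acc) (by simpa using h)]
        simp
      · rw [show PySem.Chars.splitOn.go [' '] (n+1) (c :: rest) cur acc
              = PySem.Chars.splitOn.go [' '] n rest (c :: cur) acc by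
            simp only [PySem.Chars.splitOn.go, List.isPrefixOf]
            simp
            exact fun h => absurd h.symm hc]
        rw [ih rest (c :: cur) acc (by simpa using h)]
        simp [hc]

theorem join_nil_eq_flatten (ps : List (List Char)) : PySem.Chars.join [] ps = ps.flatten := by
  induction ps with
  | nil => simp [PySem.Chars.join, List.intercalate]
  | cons p ps ih =>
    cases ps with
    | nil => simp [PySem.Chars.join, List.intercalate]
    | cons q rest =>
      rw [PySem.Chars.join_cons_cons, ih]
      simp

theorem flatten_filter_ne_nil (ps : List (List Char)) :
    (ps.filter (· ≠ ([] : List Char))).flatten = ps.flatten := by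
  induction ps with
  | nil => rfl
  | cons p ps ih =>
    by_cases hp : p = []
    · subst hp; simpa using ih
    · rw [List.filter_cons]
      simp only [hp, ne_eq, List.flatten_cons]
      simpa using ih

-- ===== VERDICT (by name: the statement is the Claim_ definition above) =====
theorem filtrarTexto_spec : Claim_equal_filtrarTexto := by
  intro text _
  unfold Spec_filtrarTexto filtrarTexto filtrarTexto_alt
  apply String.toList_inj.mp
  rw [PySem.Str.toList_replace]
  simp only [String.toList_ofList]
  rw [PySem.List.foldl_pyRange_pyGetD (PySem.Chars.splitOn text.toList [' ']) []
        (fun acc t => if t ≠ [] then acc ++ [t] else acc) [] (le_refl 0)]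
  simp only [Int.toNat_zero, List.drop_zero]
  rw [PySem.List.foldl_append_ite_eq_filter]
  rw [join_nil_eq_flatten, List.nil_append, flatten_filter_ne_nil]
  have hsplit : PySem.Chars.splitOn text.toList [' ']
      = PySem.Chars.splitOn.go [' '] (text.toList.length + 1) text.toList [] [] := rfl
  rw [hsplit, splitOn_go_space _ _ _ _ (by omega)]
  have hsep : (" " : String).toList = [' '] := rfl
  have hnew : ("" : String).toList = [] := rfl
  rw [hsep, hnew]
  rw [show PySem.Chars.replace text.toList [' '] []
        = PySem.Chars.replace.go [' '] [] text.toList.length text.toList [] by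
      simp [PySem.Chars.replace]]
  rw [replace_go_space _ _ _ (le_refl _)]
  simp
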